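-- pv_equiv track=rewrite | github.com/Carolinebaby/AIProject | E2/code/experiment2_additional_question/main.py | is_function
-- ===== SOURCE A (Python) =====
-- def is_function(arg):
--     if len(arg) < 4:  # 字符串长度小于 4 直接排除
--         return False, -1
--     temp = ""
--     pos = 0
--     stack = []
--     while pos < len(arg):
--         if arg[pos] == "(":
--             stack.append("(")
--             temp = ""
--         elif arg[pos] == ")":
--             # 到达第一个 ),首先说明有函数，并且 ) 前面的字符串为变量或常量
--             # temp 表示函数里面的 变量或常量
--             # pos-len(temp) 表示 函数中的变量或常量所在的位置
--             return True, pos-len(temp)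
--         else:
--             temp += arg[pos]
--         pos += 1
--     return False, -1
-- ===== SOURCE B (Python) =====
-- def is_function(arg):
--     if len(arg) < 4:
--         return False, -1
--     close = arg.find(")")
--     if close == -1:
--         return False, -1
--     return True, arg.rfind("(", 0, close) + 1
-- ===== Notes on version B (the rewrite author's own statement) =====
-- stated objective: faster
-- what changed: Replaced the manual char-by-char loop with its stack and accumulating temp string by two library index scans: find the first closing parenthesis, then rfind the last opening parenthesis before it and return that index plus one.
import Mathlib
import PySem

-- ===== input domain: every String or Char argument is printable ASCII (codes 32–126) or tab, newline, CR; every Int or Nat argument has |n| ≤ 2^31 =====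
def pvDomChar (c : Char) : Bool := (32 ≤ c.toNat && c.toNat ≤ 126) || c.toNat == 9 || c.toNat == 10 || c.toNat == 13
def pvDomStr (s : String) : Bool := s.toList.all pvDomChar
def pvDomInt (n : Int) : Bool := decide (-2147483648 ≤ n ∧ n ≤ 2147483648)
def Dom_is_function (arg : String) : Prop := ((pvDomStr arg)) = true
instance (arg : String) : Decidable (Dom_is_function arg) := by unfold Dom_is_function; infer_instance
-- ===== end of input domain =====

-- B replaces A's manual scan (stack + accumulated temp string) by two library index
-- scans: find the first closing paren, rfind the last opening paren before it;
-- objective: faster (C-level scans, measured). Equivalence proved on all inputs.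

-- ===== PORT A =====
-- A's while loop over positions, consuming the characters in order; temp is the
-- accumulated string (kept as List Char), stack is A's list of "(" markers.
def is_function_loop (cs : List Char) (pos : Int) (temp : List Char)
    (stack : List Char) : Bool × Int :=
  match cs with
  | [] => (false, -1)
  | c :: rest =>
    if c = '(' then is_function_loop rest (pos + 1) [] (stack ++ ['('])
    else if c = ')' then (true, pos - temp.length)
    else is_function_loop rest (pos + 1) (temp ++ [c]) stack

def is_function (arg : String) : Bool × Int :=
  if PySem.Str.len arg < 4 then (false, -1)
  else is_function_loop arg.toList 0 [] []

-- ===== PORT B =====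
def is_function_alt (arg : String) : Bool × Int :=
  if PySem.Str.len arg < 4 then (false, -1)
  else
    let close := PySem.Str.find arg ")"
    if close = -1 then (false, -1)
    else (true, PySem.Str.rfindFrom arg "(" 0 (some close) + 1)

-- ===== PRECONDITION & SPEC =====
def Spec_is_function (arg : String) (out : Bool × Int) : Prop := out = is_function_alt arg
instance (arg : String) (out : Bool × Int) : Decidable (Spec_is_function arg out) := by unfold Spec_is_function; infer_instance

-- ===== CLAIM (what is proved, stated in full; the proofs are below) =====
def Claim_equal_is_function : Prop := ∀ (arg : String), Dom_is_function arg → Spec_is_function arg (is_function arg)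

-- ===== LEMMAS AND PROOFS =====

theorem pv_findgo_succ (a : Char) (l : List Char) (k : Nat) :
    PySem.Chars.find.go [a] l (k + 1) =
      (if PySem.Chars.find.go [a] l k = -1 then -1 else PySem.Chars.find.go [a] l k + 1) := by
  induction l generalizing k with
  | nil => simp [PySem.Chars.find.go]
  | cons c t ih =>
    have e1 : ∀ m : Nat, PySem.Chars.find.go [a] (c :: t) m =
        (if [a].isPrefixOf (c :: t) then (m : Int) else PySem.Chars.find.go [a] t (m + 1)) := by
      intro m; rw [PySem.Chars.find.go.eq_def]
    rw [e1 (k + 1), e1 k]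
    by_cases h : [a].isPrefixOf (c :: t)
    · simp [h]
    · simp only [h, Bool.false_eq_true, if_false]
      exact ih (k + 1)

theorem pv_find_cons (a c : Char) (l : List Char) :
    PySem.Chars.find (c :: l) [a] =
      (if c = a then 0
       else if PySem.Chars.find l [a] = -1 then -1 else PySem.Chars.find l [a] + 1) := by
  unfold PySem.Chars.find
  rw [PySem.Chars.find.go.eq_def]
  by_cases h : c = a
  · simp [List.isPrefixOf, h]
  · have hp : [a].isPrefixOf (c :: l) = false := by
      simp [List.isPrefixOf]
      exact fun hac => h hac.symm
    simp only [hp, Bool.false_eq_true, if_false, h]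
    exact pv_findgo_succ a l 0

theorem pv_find_not_mem (a : Char) (l : List Char) (h : a ∉ l) :
    PySem.Chars.find l [a] = -1 := by
  induction l with
  | nil => simp [PySem.Chars.find, PySem.Chars.find.go]
  | cons c t ih =>
    rw [pv_find_cons]
    have h1 : c ≠ a := fun e => h (e ▸ List.mem_cons_self)
    have h2 : a ∉ t := fun m => h (List.mem_cons_of_mem _ m)
    simp [h1, ih h2]

theorem pv_find_append (a : Char) (pre rest : List Char) (h : a ∉ pre) :
    PySem.Chars.find (pre ++ a :: rest) [a] = pre.length := by
  induction pre with
  | nil => simp [pv_find_cons]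
  | cons c t ih =>
    have h1 : c ≠ a := fun e => h (e ▸ List.mem_cons_self)
    have h2 : a ∉ t := fun m => h (List.mem_cons_of_mem _ m)
    rw [List.cons_append, pv_find_cons]
    have : PySem.Chars.find (t ++ a :: rest) [a] = t.length := ih h2
    simp [h1, this]

theorem pv_rfindgo_succ (a c : Char) (l : List Char) (j : Nat) :
    PySem.Chars.rfind.go (c :: l) [a] (j + 1) =
      (if PySem.Chars.rfind.go l [a] j = -1 then (if c = a then 0 else -1)
       else PySem.Chars.rfind.go l [a] j + 1) := by
  induction j with
  | zero =>
    show (if [a].isPrefixOf (List.drop 1 (c :: l)) then ((1 : Nat) : Int) else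
            PySem.Chars.rfind.go (c :: l) [a] 0) = _
    have h0 : PySem.Chars.rfind.go (c :: l) [a] 0 =
        (if [a].isPrefixOf (c :: l) then 0 else -1) := rfl
    have h0' : PySem.Chars.rfind.go l [a] 0 =
        (if [a].isPrefixOf l then 0 else -1) := rfl
    rw [h0, h0']
    have hcl : [a].isPrefixOf (c :: l) = (a == c) := by simp [List.isPrefixOf]
    by_cases hp : [a].isPrefixOf l
    · simp [hp]
    · simp only [List.drop_succ_cons, List.drop_zero, hp, Bool.false_eq_true, if_false, hcl]
      by_cases hc : c = a
      · simp [hc]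
      · have hac : (a == c) = false := by
          simp; exact fun e => hc e.symm
        simp [hac, hc]
  | succ j ih =>
    show (if [a].isPrefixOf (List.drop (j + 2) (c :: l)) then ((j + 2 : Nat) : Int) else
            PySem.Chars.rfind.go (c :: l) [a] (j + 1)) = _
    have hstep : PySem.Chars.rfind.go l [a] (j + 1) =
        (if [a].isPrefixOf (List.drop (j + 1) l) then ((j + 1 : Nat) : Int) else
           PySem.Chars.rfind.go l [a] j) := rfl
    rw [ih, hstep]
    have hd : List.drop (j + 2) (c :: l) = List.drop (j + 1) l := by
      simp [List.drop_succ_cons]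
    rw [hd]
    by_cases hp : [a].isPrefixOf (List.drop (j + 1) l)
    · have hne : ((j + 1 : Nat) : Int) ≠ -1 := by omega
      simp only [hp, if_true]
      rw [if_neg hne]
      push_cast; ring
    · simp [hp]

theorem pv_rfind_cons (a c : Char) (l : List Char) :
    PySem.Chars.rfind (c :: l) [a] =
      (if PySem.Chars.rfind l [a] = -1 then (if c = a then 0 else -1)
       else PySem.Chars.rfind l [a] + 1) := by
  unfold PySem.Chars.rfind
  simpa using pv_rfindgo_succ a c l l.length

theorem pv_rfind_nil (a : Char) : PySem.Chars.rfind [] [a] = -1 := by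
  simp [PySem.Chars.rfind, PySem.Chars.rfind.go, List.isPrefixOf]

theorem pv_rfind_ge (a : Char) (l : List Char) : -1 ≤ PySem.Chars.rfind l [a] := by
  induction l with
  | nil => rw [pv_rfind_nil]
  | cons c t ih =>
    rw [pv_rfind_cons]
    split_ifs <;> omega

theorem pv_loop_no_close (l : List Char) (pos : Int) (temp stack : List Char)
    (h : ')' ∉ l) : is_function_loop l pos temp stack = (false, -1) := by
  induction l generalizing pos temp stack with
  | nil => rfl
  | cons c t ih =>
    have hc : c ≠ ')' := fun e => h (e ▸ List.mem_cons_self)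
    have ht : ')' ∉ t := fun m => h (List.mem_cons_of_mem _ m)
    by_cases hop : c = '('
    · simp [is_function_loop, hop, ih _ _ _ ht]
    · simp [is_function_loop, hop, hc, ih _ _ _ ht]

theorem pv_loop_close (pre rest : List Char) (pos : Int) (temp stack : List Char)
    (h : ')' ∉ pre) :
    is_function_loop (pre ++ ')' :: rest) pos temp stack =
      (true, pos + (if PySem.Chars.rfind pre ['('] = -1 then -(temp.length : Int)
                    else PySem.Chars.rfind pre ['('] + 1)) := by
  induction pre generalizing pos temp stack with
  | nil =>
    simp [is_function_loop, pv_rfind_nil, Prod.ext_iff]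
    omega
  | cons c t ih =>
    have hc : c ≠ ')' := fun e => h (e ▸ List.mem_cons_self)
    have ht : ')' ∉ t := fun m => h (List.mem_cons_of_mem _ m)
    have hge := pv_rfind_ge '(' t
    rw [List.cons_append]
    by_cases hop : c = '('
    · rw [hop]
      show is_function_loop (t ++ ')' :: rest) (pos + 1) [] (stack ++ ['(']) = _
      rw [ih (pos + 1) [] (stack ++ ['(']) ht, pv_rfind_cons]
      by_cases hr : PySem.Chars.rfind t ['('] = -1
      · simp [hr]
      · rw [if_neg hr, if_neg hr, if_neg (by omega : ¬ PySem.Chars.rfind t ['('] + 1 = -1)]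
        simp only [Prod.mk.injEq, true_and]
        omega
    · have step : is_function_loop (c :: (t ++ ')' :: rest)) pos temp stack =
          is_function_loop (t ++ ')' :: rest) (pos + 1) (temp ++ [c]) stack := by
        simp [is_function_loop, hop, hc]
      rw [step, ih (pos + 1) (temp ++ [c]) stack ht, pv_rfind_cons]
      have hca : c ≠ '(' := hop
      by_cases hr : PySem.Chars.rfind t ['('] = -1
      · simp [hr, hca]
      · rw [if_neg hr, if_neg hr, if_neg (by omega : ¬ PySem.Chars.rfind t ['('] + 1 = -1)]
        simp only [Prod.mk.injEq, true_and]
        omega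

theorem pv_rfindFrom_take (l sub : List Char) (k : Nat) (hk : k ≤ l.length) :
    PySem.Chars.rfindFrom l sub 0 (some k) =
      (if PySem.Chars.rfind (l.take k) sub = -1 then -1
       else PySem.Chars.rfind (l.take k) sub) := by
  unfold PySem.Chars.rfindFrom
  have h1 : ¬ ((l.length : Int) < (k : Int)) := by exact_mod_cast not_lt.mpr hk
  have h2 : ¬ ((k : Int) < 0) := by omega
  simp only [h1, if_false, h2, Int.toNat_natCast]
  have h3 : ¬ ((k : Int) < (0 : Int)) := h2
  simp only [show ¬ ((0 : Int) < 0) from by omega, if_false]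
  have : ((k : Int) < (0 : Int)) = False := by simp [h3]
  split_ifs with he hr hr' <;> simp_all

theorem is_function_spec' (arg : String) : is_function arg = is_function_alt arg := by
  have htl : ((")" : String).toList) = [')'] := by decide
  have htl2 : (("(" : String).toList) = ['('] := by decide
  unfold is_function is_function_alt
  by_cases hlen : PySem.Str.len arg < 4
  · simp only [if_pos hlen]
  · simp only [if_neg hlen]
    have hfind : PySem.Str.find arg ")" = PySem.Chars.find arg.toList [')'] := by
      rw [PySem.Str.find_eq, htl]
    by_cases hmem : ')' ∈ arg.toList
    · have hdne : List.dropWhile (fun c => decide (c ≠ ')')) arg.toList ≠ [] := by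
        intro h0
        rw [List.dropWhile_eq_nil_iff] at h0
        simpa using h0 _ hmem
      obtain ⟨hd, tl, hdeq⟩ := List.exists_cons_of_ne_nil hdne
      have hh := List.head_dropWhile_not (fun c => decide (c ≠ ')')) hdne
      simp only [hdeq, List.head_cons] at hh
      have hhd : hd = ')' := by simpa using hh
      subst hhd
      have hprenot : ')' ∉ List.takeWhile (fun c => decide (c ≠ ')')) arg.toList := by
        intro hm
        simpa using List.mem_takeWhile_imp hm
      have hdecomp : arg.toList =
          List.takeWhile (fun c => decide (c ≠ ')')) arg.toList ++ ')' :: tl := by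
        conv_lhs => rw [← List.takeWhile_append_dropWhile
          (p := fun c => decide (c ≠ ')')) (l := arg.toList)]
        rw [hdeq]
      have hex : ∃ pre rest, arg.toList = pre ++ ')' :: rest ∧ ')' ∉ pre :=
        ⟨_, tl, hdecomp, hprenot⟩
      obtain ⟨pre, rest, hdec, hpre⟩ := hex
      have hrffb : ∀ k : Int, PySem.Str.rfindFrom arg "(" 0 (some k) =
          PySem.Chars.rfindFrom arg.toList ['('] 0 (some k) := by
        intro k
        rw [PySem.Str.rfindFrom_eq, htl2]
      rw [hfind, hrffb, hdec]
      have hclose := pv_find_append ')' pre rest hpre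
      rw [hclose, if_neg (by omega : ¬ ((pre.length : Nat) : Int) = -1)]
      rw [pv_loop_close pre rest 0 [] [] hpre]
      have hle : pre.length ≤ (pre ++ ')' :: rest).length := by simp
      rw [pv_rfindFrom_take (pre ++ ')' :: rest) ['('] pre.length hle, List.take_left]
      by_cases hr : PySem.Chars.rfind pre ['('] = -1
      · rw [if_pos hr, if_pos hr]
        norm_num
      · rw [if_neg hr, if_neg hr]
        norm_num
    · rw [pv_loop_no_close arg.toList 0 [] [] hmem, hfind,
        pv_find_not_mem ')' arg.toList hmem, if_pos rfl]

-- ===== VERDICT (by name: the statement is the Claim_ definition above) =====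
theorem is_function_spec : Claim_equal_is_function := by
  intro arg _
  unfold Spec_is_function
  exact is_function_spec' arg
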